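-- pv_equiv track=rewrite | github.com/Joentze/IS469-research | retrieval/chunkers/agentic.py | enforce_chunk_size_rules
-- ===== SOURCE A (Python) =====
-- from typing import Any, List
--
-- def _normalize_breakpoints(raw_breakpoints: List[int], sentence_count: int) -> List[int]:
--     """Keep sorted valid sentence-end indexes for chunk boundaries."""
--     if sentence_count <= 1:
--         return []
--     return sorted({idx for idx in raw_breakpoints if 0 <= idx < sentence_count - 1})
--
-- def _fallback_breakpoints(sentence_count: int, max_sentences: int) -> List[int]:
--     """Deterministic fallback if the chunking agent output is invalid."""
--     if sentence_count <= max_sentences: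
--         return []
--
--     breaks: List[int] = []
--     idx = max_sentences - 1
--     while idx < sentence_count - 1:
--         breaks.append(idx)
--         idx += max_sentences
--     return breaks
--
-- def enforce_chunk_size_rules(
--     breaks: List[int],
--     sentence_count: int,
--     min_sentences: int,
--     max_sentences: int,
-- ) -> List[int]:
--     """Adjust boundaries to avoid tiny chunks and very large chunks."""
--     if sentence_count <= 1:
--         return []
--
--     all_breaks = _normalize_breakpoints(breaks, sentence_count)
--     if not all_breaks:
--         return _fallback_breakpoints(sentence_count, max_sentences)
--
--     filtered: List[int] = []
--     start = 0
--     for brk in all_breaks: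
--         chunk_len = brk - start + 1
--         if chunk_len >= min_sentences:
--             filtered.append(brk)
--             start = brk + 1
--
--     with_caps: List[int] = []
--     start = 0
--     for brk in filtered + [sentence_count - 1]:
--         while brk - start + 1 > max_sentences:
--             cap_break = start + max_sentences - 1
--             if cap_break < sentence_count - 1:
--                 with_caps.append(cap_break)
--             start = cap_break + 1
--         if brk < sentence_count - 1:
--             with_caps.append(brk)
--         start = brk + 1
--
--     return _normalize_breakpoints(with_caps, sentence_count)
-- ===== SOURCE B (Python) =====
-- from typing import List
--
-- def enforce_chunk_size_rules(
--     breaks: List[int],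
--     sentence_count: int,
--     min_sentences: int,
--     max_sentences: int,
-- ) -> List[int]:
--     """Single greedy pass: min-filter and max-cap fused into one loop."""
--     if sentence_count <= 1:
--         return []
--
--     normalized = sorted({i for i in breaks if 0 <= i < sentence_count - 1})
--     if not normalized:
--         if sentence_count <= max_sentences:
--             return []
--         return list(range(max_sentences - 1, sentence_count - 1, max_sentences))
--
--     out: List[int] = []
--     start = 0
--     for brk in normalized:
--         if brk - start + 1 >= min_sentences:
--             while brk - start + 1 > max_sentences:
--                 cap = start + max_sentences - 1
--                 out.append(cap)
--                 start = cap + 1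
--             out.append(brk)
--             start = brk + 1
--     last = sentence_count - 1
--     while last - start + 1 > max_sentences:
--         cap = start + max_sentences - 1
--         out.append(cap)
--         start = cap + 1
--     return sorted(set(out))
-- ===== Notes on version B (the rewrite author's own statement) =====
-- stated objective: simpler
-- what changed: A's two sequential passes (min-filter building an intermediate list, then a cap pass over it plus re-normalization guarded by an always-true internality test) are fused into one greedy loop that emits cap breaks inline, with the fallback computed as a closed-form range() instead of a hand-written while loop.
import Mathlib
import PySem

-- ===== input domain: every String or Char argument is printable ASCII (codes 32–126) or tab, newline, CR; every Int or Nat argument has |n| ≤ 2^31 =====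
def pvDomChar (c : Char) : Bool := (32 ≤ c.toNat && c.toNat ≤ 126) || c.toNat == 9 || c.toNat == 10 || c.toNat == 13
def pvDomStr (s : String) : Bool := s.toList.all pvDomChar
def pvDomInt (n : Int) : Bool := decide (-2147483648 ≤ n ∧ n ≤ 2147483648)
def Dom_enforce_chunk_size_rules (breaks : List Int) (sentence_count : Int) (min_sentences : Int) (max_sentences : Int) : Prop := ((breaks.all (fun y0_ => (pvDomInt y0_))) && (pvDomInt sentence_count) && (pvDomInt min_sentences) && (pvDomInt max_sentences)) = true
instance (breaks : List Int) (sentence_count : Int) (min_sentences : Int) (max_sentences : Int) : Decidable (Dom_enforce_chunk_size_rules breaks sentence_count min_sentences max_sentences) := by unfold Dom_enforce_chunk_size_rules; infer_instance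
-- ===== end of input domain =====

-- B fuses A's two sequential passes (min-filter then max-cap) into one greedy loop,
-- drops the always-true internality guard on caps, and computes the fallback with a
-- closed-form range; objective: simpler (same return value on all inputs where A terminates).

-- ===== PORT A =====

-- _normalize_breakpoints
def pvNormA (raw : List Int) (sc : Int) : List Int :=
  if sc ≤ 1 then []
  else PySem.List.sorted
    (PySem.Set.ofList (raw.filter (fun i => decide (0 ≤ i ∧ i < sc - 1)))) (fun x => x)

-- the while-loop of _fallback_breakpoints; the Nat fuel only totalizes the recursion
-- (callers pass enough fuel whenever Python's loop terminates; Python loops forever otherwise)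
def pvFallbackLoop : Nat → Int → Int → Int → List Int
  | 0, _, _, _ => []
  | fuel + 1, idx, sc, maxs =>
    if idx < sc - 1 then idx :: pvFallbackLoop fuel (idx + maxs) sc maxs else []

-- _fallback_breakpoints
def pvFallbackA (sc maxs : Int) : List Int :=
  if sc ≤ maxs then [] else pvFallbackLoop (sc - maxs).toNat (maxs - 1) sc maxs

-- A's first pass over all_breaks (state: filtered, start)
def pvFilterLoopA (bs : List Int) (start minS : Int) : List Int :=
  match bs with
  | [] => []
  | b :: rest =>
    if minS ≤ b - start + 1 then b :: pvFilterLoopA rest (b + 1) minS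
    else pvFilterLoopA rest start minS

-- A's inner while loop of the cap pass (returns emitted caps and the final start);
-- the Nat fuel only totalizes the recursion, as above
def pvCapWhileA : Nat → Int → Int → Int → Int → List Int × Int
  | 0, _, start, _, _ => ([], start)
  | fuel + 1, brk, start, maxs, sc =>
    if maxs < brk - start + 1 then
      let cap := start + maxs - 1
      let r := pvCapWhileA fuel brk (cap + 1) maxs sc
      ((if cap < sc - 1 then cap :: r.1 else r.1), r.2)
    else ([], start)

-- A's second pass, over filtered + [sentence_count - 1]
def pvCapPassA (bs : List Int) (start maxs sc : Int) : List Int :=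
  match bs with
  | [] => []
  | b :: rest =>
    (pvCapWhileA (b - start).toNat b start maxs sc).1
      ++ (if b < sc - 1 then [b] else [])
      ++ pvCapPassA rest (b + 1) maxs sc

def enforce_chunk_size_rules (breaks : List Int) (sentence_count : Int) (min_sentences : Int) (max_sentences : Int) : List Int :=
  if sentence_count ≤ 1 then []
  else
    let all_breaks := pvNormA breaks sentence_count
    if all_breaks = [] then pvFallbackA sentence_count max_sentences
    else
      pvNormA
        (pvCapPassA (pvFilterLoopA all_breaks 0 min_sentences ++ [sentence_count - 1])
          0 max_sentences sentence_count)
        sentence_count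

-- ===== PORT B =====

-- the fused loop's inner while (emit caps for the segment ending at brk);
-- the Nat fuel only totalizes the recursion (callers pass enough fuel whenever
-- Python's loop terminates)
def pvEmitCapsB : Nat → Int → Int → Int → List Int × Int
  | 0, _, start, _ => ([], start)
  | fuel + 1, brk, start, maxs =>
    if maxs < brk - start + 1 then
      let cap := start + maxs - 1
      let r := pvEmitCapsB fuel brk (cap + 1) maxs
      (cap :: r.1, r.2)
    else ([], start)

-- B's single fused pass (returns out and the final start)
def pvFusedB (bs : List Int) (start minS maxs : Int) : List Int × Int :=
  match bs with
  | [] => ([], start)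
  | b :: rest =>
    if minS ≤ b - start + 1 then
      let c := pvEmitCapsB (b - start).toNat b start maxs
      let r := pvFusedB rest (b + 1) minS maxs
      (c.1 ++ b :: r.1, r.2)
    else pvFusedB rest start minS maxs

def enforce_chunk_size_rules_alt (breaks : List Int) (sentence_count : Int) (min_sentences : Int) (max_sentences : Int) : List Int :=
  if sentence_count ≤ 1 then []
  else
    let normalized := PySem.List.sorted
      (PySem.Set.ofList (breaks.filter (fun i => decide (0 ≤ i ∧ i < sentence_count - 1))))
      (fun x => x)
    if normalized = [] then
      if sentence_count ≤ max_sentences then []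
      else PySem.List.pyRange (max_sentences - 1) (sentence_count - 1) max_sentences
    else
      let r := pvFusedB normalized 0 min_sentences max_sentences
      let t := pvEmitCapsB (sentence_count - 1 - r.2).toNat (sentence_count - 1) r.2 max_sentences
      PySem.List.sorted (PySem.Set.ofList (r.1 ++ t.1)) (fun x => x)

-- ===== PRECONDITION & SPEC =====
-- A terminates iff sentence_count ≤ 1 or max_sentences ≥ 1: otherwise its while loops
-- (fallback stepping, cap splitting) never advance and Python loops forever; Pre_
-- excludes exactly those diverging inputs.
def Pre_enforce_chunk_size_rules (breaks : List Int) (sentence_count : Int) (min_sentences : Int) (max_sentences : Int) : Prop :=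
  sentence_count ≤ 1 ∨ 1 ≤ max_sentences
instance (breaks : List Int) (sentence_count : Int) (min_sentences : Int) (max_sentences : Int) : Decidable (Pre_enforce_chunk_size_rules breaks sentence_count min_sentences max_sentences) := by unfold Pre_enforce_chunk_size_rules; infer_instance

def pvWitness_enforce_chunk_size_rules : List Int × Int × Int × Int := ([1, 4], 8, 2, 3)

def Spec_enforce_chunk_size_rules (breaks : List Int) (sentence_count : Int) (min_sentences : Int) (max_sentences : Int) (out : List Int) : Prop := out = enforce_chunk_size_rules_alt breaks sentence_count min_sentences max_sentences
instance (breaks : List Int) (sentence_count : Int) (min_sentences : Int) (max_sentences : Int) (out : List Int) : Decidable (Spec_enforce_chunk_size_rules breaks sentence_count min_sentences max_sentences out) := by unfold Spec_enforce_chunk_size_rules; infer_instance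

-- ===== CLAIM (what is proved, stated in full; the proofs are below) =====
def Claim_equal_enforce_chunk_size_rules : Prop := ∀ (breaks : List Int) (sentence_count : Int) (min_sentences : Int) (max_sentences : Int), Dom_enforce_chunk_size_rules breaks sentence_count min_sentences max_sentences → Pre_enforce_chunk_size_rules breaks sentence_count min_sentences max_sentences → Spec_enforce_chunk_size_rules breaks sentence_count min_sentences max_sentences (enforce_chunk_size_rules breaks sentence_count min_sentences max_sentences)

-- ===== LEMMAS AND PROOFS =====

-- step-s range unfolds one element at a time (0 < s)
theorem pvRange_pos_cons (a b s : Int) (hs : 0 < s) (hab : a < b) :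
    PySem.List.pyRange a b s = a :: PySem.List.pyRange (a + s) b s := by
  rw [PySem.List.pyRange_of_pos a b hs, PySem.List.pyRange_of_pos (a + s) b hs]
  rw [if_pos hab]
  have key : (b - a + s - 1) / s = (b - a - 1) / s + 1 := by
    have h1 : b - a + s - 1 = (b - a - 1) + 1 * s := by ring
    rw [h1, Int.add_mul_ediv_right _ _ (by omega : s ≠ 0)]
  have hnn : 0 ≤ (b - a - 1) / s := Int.ediv_nonneg (by omega) (by omega)
  by_cases h2 : a + s < b
  · rw [if_pos h2]
    have h3 : b - (a + s) + s - 1 = b - a - 1 := by ring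
    rw [h3, key]
    have h4 : ((b - a - 1) / s + 1).toNat = ((b - a - 1) / s).toNat + 1 := by omega
    rw [h4, List.range_succ_eq_map, List.map_cons, List.map_map]
    refine congrArg₂ List.cons (by simp) ?_
    apply List.map_congr_left; intro k _; simp; ring
  · rw [if_neg h2]
    have h5 : (b - a - 1) / s = 0 := Int.ediv_eq_zero_of_lt (by omega) (by omega)
    rw [key, h5]
    norm_num

theorem pvRange_pos_nil (a b s : Int) (hs : 0 < s) (hab : b ≤ a) :
    PySem.List.pyRange a b s = [] := by
  rw [PySem.List.pyRange_of_pos a b hs]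
  simp [if_neg (by omega : ¬ a < b)]

-- A's fallback while-loop is the closed-form range (given enough fuel)
theorem pvFallback_eq_range (fuel : Nat) : ∀ (idx sc maxs : Int), 1 ≤ maxs →
    (sc - 1 - idx).toNat ≤ fuel →
    pvFallbackLoop fuel idx sc maxs = PySem.List.pyRange idx (sc - 1) maxs := by
  induction fuel with
  | zero =>
      intro idx sc maxs hm hf
      rw [pvFallbackLoop, pvRange_pos_nil idx (sc - 1) maxs (by omega) (by omega)]
  | succ fuel ih =>
      intro idx sc maxs hm hf
      rw [pvFallbackLoop]
      by_cases h : idx < sc - 1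
      · rw [if_pos h, ih (idx + maxs) sc maxs hm (by omega),
          pvRange_pos_cons idx (sc - 1) maxs (by omega) h]
      · rw [if_neg h, pvRange_pos_nil idx (sc - 1) maxs (by omega) (by omega)]

-- the internality guard of A's cap loop is always true when brk ≤ sc - 1
theorem pvCapWhileA_eq_emit (fuel : Nat) : ∀ (brk start maxs sc : Int), brk ≤ sc - 1 →
    pvCapWhileA fuel brk start maxs sc = pvEmitCapsB fuel brk start maxs := by
  induction fuel with
  | zero => intro brk start maxs sc _; rfl
  | succ fuel ih =>
      intro brk start maxs sc hb
      rw [pvCapWhileA, pvEmitCapsB]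
      by_cases h : maxs < brk - start + 1
      · rw [if_pos h, if_pos h]
        simp only [ih brk (start + maxs - 1 + 1) maxs sc hb,
          if_pos (show start + maxs - 1 < sc - 1 by omega)]
      · rw [if_neg h, if_neg h]

-- bounds of the emitted caps and of the final start
theorem pvEmitCapsB_bounds (fuel : Nat) : ∀ (brk start maxs : Int), 1 ≤ maxs → 0 ≤ start →
    (∀ x ∈ (pvEmitCapsB fuel brk start maxs).1, 0 ≤ x ∧ x < brk) ∧
      0 ≤ (pvEmitCapsB fuel brk start maxs).2 := by
  induction fuel with
  | zero =>
      intro brk start maxs hm h0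
      exact ⟨by intro x hx; simp [pvEmitCapsB] at hx, h0⟩
  | succ fuel ih =>
      intro brk start maxs hm h0
      rw [pvEmitCapsB]
      by_cases h : maxs < brk - start + 1
      · rw [if_pos h]
        have ihr := ih brk (start + maxs - 1 + 1) maxs hm (by omega)
        refine ⟨?_, ihr.2⟩
        intro x hx
        rcases List.mem_cons.mp hx with he | ht
        · omega
        · exact (ihr.1 x ht).imp (fun a => a) (fun a => a)
      · rw [if_neg h]
        exact ⟨by intro x hx; simp at hx, h0⟩

-- the fused pass stays within bounds and keeps start nonnegative
theorem pvFusedB_bounds (bs : List Int) (minS maxs sc : Int) (hm : 1 ≤ maxs)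
    (hbs : ∀ b ∈ bs, 0 ≤ b ∧ b < sc - 1) (start : Int) (h0 : 0 ≤ start) :
    (∀ x ∈ (pvFusedB bs start minS maxs).1, 0 ≤ x ∧ x < sc - 1) ∧
      0 ≤ (pvFusedB bs start minS maxs).2 := by
  induction bs generalizing start with
  | nil => exact ⟨by intro x hx; simp [pvFusedB] at hx, h0⟩
  | cons b rest ih =>
      have hb := hbs b (List.mem_cons_self ..)
      have hrest : ∀ x ∈ rest, 0 ≤ x ∧ x < sc - 1 := fun x hx => hbs x (List.mem_cons_of_mem _ hx)
      by_cases hc : minS ≤ b - start + 1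
      · have ihr := ih hrest (b + 1) (by omega)
        refine ⟨?_, by simpa [pvFusedB, hc] using ihr.2⟩
        intro x hx
        simp only [pvFusedB, if_pos hc, List.mem_append, List.mem_cons] at hx
        rcases hx with hx | hx | hx
        · have := (pvEmitCapsB_bounds _ b start maxs hm h0).1 x hx; omega
        · omega
        · exact ihr.1 x hx
      · simpa [pvFusedB, hc] using ih hrest start h0

-- fusing the min-filter pass into the cap pass
theorem pvFused_eq_passes (bs : List Int) (minS maxs sc : Int)
    (hbs : ∀ b ∈ bs, b < sc - 1) (start : Int) :
    pvCapPassA (pvFilterLoopA bs start minS ++ [sc - 1]) start maxs sc =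
      (pvFusedB bs start minS maxs).1
        ++ (pvEmitCapsB (sc - 1 - (pvFusedB bs start minS maxs).2).toNat (sc - 1)
              (pvFusedB bs start minS maxs).2 maxs).1 := by
  induction bs generalizing start with
  | nil =>
      simp [pvFilterLoopA, pvFusedB, pvCapPassA,
        pvCapWhileA_eq_emit _ (sc - 1) start maxs sc (le_refl _)]
  | cons b rest ih =>
      have hb := hbs b (List.mem_cons_self ..)
      have hrest : ∀ x ∈ rest, x < sc - 1 := fun x hx => hbs x (List.mem_cons_of_mem _ hx)
      by_cases hc : minS ≤ b - start + 1
      · simp only [pvFilterLoopA, if_pos hc, List.cons_append, pvCapPassA, pvFusedB]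
        rw [pvCapWhileA_eq_emit _ b start maxs sc (by omega), ih hrest (b + 1),
          if_pos hb]
        simp
      · simp only [pvFilterLoopA, if_neg hc, pvFusedB]
        exact ih hrest start

-- normalization is the identity on a list already inside [0, sc-2]
theorem pvNormA_of_bounds (xs : List Int) (sc : Int) (hsc : ¬ sc ≤ 1)
    (h : ∀ x ∈ xs, 0 ≤ x ∧ x < sc - 1) :
    pvNormA xs sc = PySem.List.sorted (PySem.Set.ofList xs) (fun x => x) := by
  rw [pvNormA, if_neg hsc, List.filter_eq_self.mpr]
  intro x hx
  simpa using h x hx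

-- members of the normalized list are in [0, sc-2]
theorem pvNorm_mem (raw : List Int) (sc b : Int)
    (hb : b ∈ PySem.List.sorted
      (PySem.Set.ofList (raw.filter (fun i => decide (0 ≤ i ∧ i < sc - 1)))) (fun x => x)) :
    0 ≤ b ∧ b < sc - 1 := by
  have := ((PySem.List.sorted_perm _ _ _).mem_iff).mp hb
  have := (PySem.Set.mem_ofList _ _).mp this
  simpa using List.of_mem_filter this

-- ===== VERDICT (by name: the statement is the Claim_ definition above) =====
theorem enforce_chunk_size_rules_spec : Claim_equal_enforce_chunk_size_rules := by
  intro breaks sc minS maxs _ hpre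
  unfold Spec_enforce_chunk_size_rules enforce_chunk_size_rules enforce_chunk_size_rules_alt
  by_cases hsc : sc ≤ 1
  · simp [hsc]
  · have hm : 1 ≤ maxs := by rcases hpre with h | h; omega; exact h
    rw [if_neg hsc, if_neg hsc]
    have hnorm : pvNormA breaks sc =
        PySem.List.sorted
          (PySem.Set.ofList (breaks.filter (fun i => decide (0 ≤ i ∧ i < sc - 1)))) (fun x => x) := by
      rw [pvNormA, if_neg hsc]
    rw [hnorm]
    set N := PySem.List.sorted
      (PySem.Set.ofList (breaks.filter (fun i => decide (0 ≤ i ∧ i < sc - 1)))) (fun x => x) with hN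
    by_cases hemp : N = []
    · rw [if_pos hemp, if_pos hemp, pvFallbackA]
      by_cases hle : sc ≤ maxs
      · simp [hle]
      · rw [if_neg hle, if_neg hle, pvFallback_eq_range _ _ _ _ hm (by omega)]
    · rw [if_neg hemp, if_neg hemp]
      have hmem : ∀ b ∈ N, 0 ≤ b ∧ b < sc - 1 := fun b hb => pvNorm_mem breaks sc b (hN ▸ hb)
      rw [pvFused_eq_passes N minS maxs sc (fun b hb => (hmem b hb).2) 0]
      have hbnd := pvFusedB_bounds N minS maxs sc hm hmem 0 (by omega)
      apply pvNormA_of_bounds _ _ hsc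
      intro x hx
      rcases List.mem_append.mp hx with hx | hx
      · exact hbnd.1 x hx
      · have := (pvEmitCapsB_bounds _ (sc - 1) _ maxs hm hbnd.2).1 x hx
        omega
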